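-- pv_equiv track=rewrite | github.com/daoran/proto | scripts/api.py | process_docstring
-- ===== SOURCE A (Python) =====
-- def process_docstring(data):
--     if "doxygen" not in data or data["doxygen"] is None:
--         return None
--
--     data = data["doxygen"]
--     data = data.replace("/**", "")
--     data = data.replace("*/", "")
--
--     lines = data.split("\n")
--     output = ""
--     for line in lines:
--         if line == "" or line == " ":
--             continue
--         output += line[2:] if line[:2] == "* " else line
--         output += "\n"
--     output = output.strip()
--
--     result = ""
--     code_on = False
--     for c in output:
--         if c == "`" and code_on is False:
--             result += "<code>"
--             code_on = True
--         elif c == "`" and code_on: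
--             result += "</code>"
--             code_on = False
--         else:
--             result += c
--     result += "\n"
--
--     return result
-- ===== SOURCE B (Python) =====
-- def process_docstring(data):
--     if "doxygen" not in data or data["doxygen"] is None:
--         return None
--     text = data["doxygen"].replace("/**", "").replace("*/", "")
--     body = "\n".join(
--         line[2:] if line.startswith("* ") else line
--         for line in text.split("\n")
--         if line not in ("", " ")
--     ).strip()
--     parts = body.split("`")
--     tagged = "".join(
--         ("<code>" if i % 2 == 0 else "</code>") + seg
--         for i, seg in enumerate(parts[1:])
--     )
--     return parts[0] + tagged + "\n"
-- ===== Notes on version B (the rewrite author's own statement) =====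
-- stated objective: simpler
-- what changed: The accumulator loop over lines is replaced by a filter/map comprehension joined with newline, and the char-by-char boolean-toggle backtick loop is replaced by splitting on '`' and rejoining with tags chosen by segment-index parity (no mutable state).
import Mathlib
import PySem

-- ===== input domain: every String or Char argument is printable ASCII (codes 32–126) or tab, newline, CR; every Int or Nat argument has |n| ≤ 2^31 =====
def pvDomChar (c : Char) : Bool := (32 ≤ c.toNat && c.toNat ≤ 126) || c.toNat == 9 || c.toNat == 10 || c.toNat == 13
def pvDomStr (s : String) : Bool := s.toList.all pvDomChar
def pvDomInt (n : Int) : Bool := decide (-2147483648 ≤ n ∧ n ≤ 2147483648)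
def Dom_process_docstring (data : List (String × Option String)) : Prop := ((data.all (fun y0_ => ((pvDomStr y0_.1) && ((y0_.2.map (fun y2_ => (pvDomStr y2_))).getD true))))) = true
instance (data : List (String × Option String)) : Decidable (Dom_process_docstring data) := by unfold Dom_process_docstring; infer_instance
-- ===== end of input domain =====

-- B replaces A's two accumulator loops by a filter/map line comprehension joined with '\n'
-- and a split-on-'`' rejoin with tags picked by segment-index parity (objective: simpler).

-- ===== PORT A =====
def process_docstring (data : List (String × Option String)) : Option String :=
  match List.lookup "doxygen" data with
  | none => none
  | some none => none
  | some (some s) =>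
    let text := PySem.Chars.replace (PySem.Chars.replace s.toList "/**".toList []) "*/".toList []
    let lines := PySem.Chars.splitOn text ['\n']
    let output := lines.foldl (fun acc line =>
      if line = [] ∨ line = [' '] then acc
      else (acc ++ (if PySem.Chars.slice line none (some 2) = "* ".toList
                    then PySem.Chars.slice line (some 2) none else line)) ++ ['\n']) []
    let output := PySem.Chars.strip output
    let result := (output.foldl (fun (st : List Char × Bool) c =>
        if c = '`' ∧ st.2 = false then (st.1 ++ "<code>".toList, true)
        else if c = '`' ∧ st.2 = true then (st.1 ++ "</code>".toList, false)
        else (st.1 ++ [c], st.2)) ([], false)).1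
    some (String.ofList (result ++ ['\n']))

-- ===== PORT B =====
def process_docstring_alt (data : List (String × Option String)) : Option String :=
  match List.lookup "doxygen" data with
  | none => none
  | some none => none
  | some (some s) =>
    let text := PySem.Chars.replace (PySem.Chars.replace s.toList "/**".toList []) "*/".toList []
    let body := PySem.Chars.strip (PySem.Chars.join ['\n']
      (((PySem.Chars.splitOn text ['\n']).filter
          (fun l => !(decide (l = [] ∨ l = [' '])))).map
        (fun l => if PySem.Chars.startswith l "* ".toList then l.drop 2 else l)))
    match PySem.Chars.splitOn body ['`'] with
    | [] => none   -- unreachable: str.split never returns an empty list (Python's parts[0] would raise)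
    | p0 :: rest =>
      let tagged := PySem.Chars.join []
        ((PySem.List.enumerate rest).map
          (fun p => (if PySem.Int.mod p.1 2 = 0 then "<code>".toList else "</code>".toList) ++ p.2))
      some (String.ofList (p0 ++ tagged ++ ['\n']))

-- ===== PRECONDITION & SPEC =====
def Spec_process_docstring (data : List (String × Option String)) (out : Option String) : Prop := out = process_docstring_alt data
instance (data : List (String × Option String)) (out : Option String) : Decidable (Spec_process_docstring data out) := by unfold Spec_process_docstring; infer_instance

-- ===== CLAIM (what is proved, stated in full; the proofs are below) =====
def Claim_equal_process_docstring : Prop := ∀ (data : List (String × Option String)), Dom_process_docstring data → Spec_process_docstring data (process_docstring data)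

-- ===== LEMMAS AND PROOFS =====

-- recursive model of str.split('`')
def pdSplit : List Char → List Char → List (List Char)
  | [], cur => [cur.reverse]
  | c :: rest, cur => if c = '`' then cur.reverse :: pdSplit rest [] else pdSplit rest (c :: cur)

-- recursive model of A's toggle loop (tail it produces from state `on`)
def pdT : Bool → List Char → List Char
  | _, [] => []
  | on, c :: rest =>
    if c = '`' then (if on then "</code>".toList else "<code>".toList) ++ pdT (!on) rest
    else c :: pdT on rest

-- tag-then-segment interleaving; b = "next tag is <code>"
def pdInter : Bool → List (List Char) → List Char
  | _, [] => []
  | b, x :: rest => (if b then "<code>".toList else "</code>".toList) ++ x ++ pdInter (!b) rest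

def pdAltB : List (List Char) → Bool → List Char
  | [], _ => []
  | x :: rest, b => x ++ pdInter b rest

lemma pd_split_ne_nil : ∀ (cs cur : List Char), pdSplit cs cur ≠ [] := by
  intro cs
  induction cs with
  | nil => intro cur; simp [pdSplit]
  | cons c rest ih =>
    intro cur
    simp only [pdSplit]
    split
    · simp
    · exact ih _

lemma pd_go (fuel : Nat) : ∀ (l cur : List Char) (acc : List (List Char)), l.length < fuel →
    PySem.Chars.splitOn.go ['`'] fuel l cur acc = acc.reverse ++ pdSplit l cur := by
  induction fuel with
  | zero => intro l cur acc h; omega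
  | succ n ih =>
    intro l cur acc h
    cases l with
    | nil => rw [PySem.Chars.splitOn.go.eq_def]; simp [pdSplit]
    | cons c rest =>
      rw [PySem.Chars.splitOn.go.eq_def]
      simp only [List.isPrefixOf, List.isPrefixOf_nil_left, Bool.and_true]
      by_cases hc : c = '`'
      · subst hc
        simp only [beq_self_eq_true, if_pos]
        rw [show List.drop ['`'].length ('`' :: rest) = rest from rfl]
        rw [ih rest [] (cur.reverse :: acc) (by simp at h ⊢; omega)]
        simp [pdSplit]
      · have : ('`' == c) = false := by simp [hc]; intro h'; exact hc h'.symm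
        simp only [this, Bool.false_eq_true, if_neg, List.length_cons] at *
        rw [ih rest (c :: cur) acc (by omega)]
        simp [pdSplit, hc]

lemma pd_split_eq (cs : List Char) : PySem.Chars.splitOn cs ['`'] = pdSplit cs [] := by
  unfold PySem.Chars.splitOn
  rw [pd_go (cs.length + 1) cs [] [] (by omega)]
  simp

lemma pd_toggle (cs : List Char) : ∀ (res : List Char) (on : Bool),
    (cs.foldl (fun (st : List Char × Bool) c =>
        if c = '`' ∧ st.2 = false then (st.1 ++ "<code>".toList, true)
        else if c = '`' ∧ st.2 = true then (st.1 ++ "</code>".toList, false)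
        else (st.1 ++ [c], st.2)) (res, on)).1 = res ++ pdT on cs := by
  induction cs with
  | nil => intro res on; simp [pdT]
  | cons c rest ih =>
    intro res on
    by_cases hc : c = '`'
    · subst hc
      cases on with
      | false => simp only [List.foldl_cons, pdT]; rw [ih]; simp
      | true => simp only [List.foldl_cons, pdT]; rw [ih]; simp
    · simp only [List.foldl_cons, pdT, hc]
      cases on <;> simp only [if_neg (by simp [hc] : ¬(c = '`' ∧ _)), if_neg (by simp [hc] : ¬(c = '`' ∧ _))] <;> rw [ih] <;> simp [hc]

lemma pd_alt (cs : List Char) : ∀ (cur : List Char) (on : Bool),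
    pdAltB (pdSplit cs cur) (!on) = cur.reverse ++ pdT on cs := by
  induction cs with
  | nil => intro cur on; simp [pdSplit, pdAltB, pdInter, pdT]
  | cons c rest ih =>
    intro cur on
    by_cases hc : c = '`'
    · subst hc
      rcases hps : pdSplit rest [] with _ | ⟨x, r⟩
      · exact absurd hps (pd_split_ne_nil rest [])
      · have hih := ih [] (!on)
        rw [hps] at hih
        simp only [pdAltB, List.reverse_nil, List.nil_append, Bool.not_not] at hih
        simp only [pdSplit, if_pos rfl, pdAltB, pdT, pdInter, hps]
        rw [← hih]
        cases on <;> simp [pdInter]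
    · simp only [pdSplit, if_neg hc, pdT]
      rw [ih (c :: cur) on]
      simp

lemma pd_join_flat : ∀ (L : List (List Char)), PySem.Chars.join [] L = L.flatten := by
  intro L
  induction L with
  | nil => simp [PySem.Chars.join_nil]
  | cons x xs ih =>
    cases xs with
    | nil => simp [PySem.Chars.join_singleton]
    | cons y r =>
      rw [PySem.Chars.join_cons_cons]
      simp only [List.flatten_cons] at ih ⊢
      rw [ih]; simp

lemma pd_parity (s : Int) : (PySem.Int.mod (s + 1) 2 = 0) ↔ ¬ (PySem.Int.mod s 2 = 0) := by
  rw [PySem.Int.mod_eq_emod_of_pos (by norm_num), PySem.Int.mod_eq_emod_of_pos (by norm_num)]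
  omega

lemma pd_enum (rest : List (List Char)) : ∀ (s : Int),
    ((PySem.List.enumerate rest s).map
      (fun p => (if PySem.Int.mod p.1 2 = 0 then "<code>".toList else "</code>".toList) ++ p.2)).flatten
    = pdInter (decide (PySem.Int.mod s 2 = 0)) rest := by
  induction rest with
  | nil => intro s; simp [PySem.List.enumerate_nil, pdInter]
  | cons x xs ih =>
    intro s
    rw [PySem.List.enumerate_cons]
    simp only [List.map_cons, List.flatten_cons, pdInter]
    rw [ih (s + 1)]
    have hb : decide (PySem.Int.mod (s + 1) 2 = 0) = !decide (PySem.Int.mod s 2 = 0) := by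
      by_cases h : PySem.Int.mod s 2 = 0
      · have hn : ¬ PySem.Int.mod (s + 1) 2 = 0 := fun hh => (pd_parity s).mp hh h
        simp only [h, decide_true, Bool.not_true, decide_eq_false_iff_not]
        exact hn
      · have hy : PySem.Int.mod (s + 1) 2 = 0 := (pd_parity s).mpr h
        simp only [hy, decide_true]
        rw [decide_eq_false h]
        rfl
    rw [hb]
    by_cases h : PySem.Int.mod s 2 = 0 <;> simp [h]

lemma pd_g_eq (l : List Char) :
    (if PySem.Chars.slice l none (some 2) = "* ".toList then PySem.Chars.slice l (some 2) none else l)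
    = (if PySem.Chars.startswith l "* ".toList then l.drop 2 else l) := by
  have h1 : PySem.Chars.slice l none (some 2) = l.take 2 := by
    rw [PySem.Chars.slice_eq_listSlice, PySem.List.slice_to l (by norm_num : (0:Int) ≤ 2)]
    rfl
  have h2 : PySem.Chars.slice l (some 2) none = l.drop 2 := by
    rw [PySem.Chars.slice_eq_listSlice, PySem.List.slice_from l (by norm_num : (0:Int) ≤ 2)]
    rfl
  have h3 : (PySem.Chars.startswith l "* ".toList = true) ↔ l.take 2 = "* ".toList := by
    rw [PySem.Chars.startswith_iff, List.prefix_iff_eq_take]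
    constructor
    · intro h; exact h.symm
    · intro h; exact h.symm
  rw [h1, h2]
  by_cases h : l.take 2 = "* ".toList
  · rw [if_pos h, if_pos (h3.mpr h)]
  · rw [if_neg h, if_neg (fun hh => h (h3.mp hh))]

lemma pd_demark (lines : List (List Char)) : ∀ (acc : List Char),
    lines.foldl (fun acc line =>
      if line = [] ∨ line = [' '] then acc
      else (acc ++ (if PySem.Chars.slice line none (some 2) = "* ".toList
                    then PySem.Chars.slice line (some 2) none else line)) ++ ['\n']) acc
    = acc ++ (((lines.filter (fun l => !(decide (l = [] ∨ l = [' '])))).map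
        (fun l => if PySem.Chars.startswith l "* ".toList then l.drop 2 else l)).map
          (fun x => x ++ ['\n'])).flatten := by
  induction lines with
  | nil => intro acc; simp
  | cons l rest ih =>
    intro acc
    by_cases h : l = [] ∨ l = [' ']
    · simp only [List.foldl_cons, if_pos h, List.filter_cons, decide_eq_true_eq, h,
        decide_true, Bool.not_true]
      exact ih acc
    · simp only [List.foldl_cons, if_neg h, List.filter_cons, h, decide_false, Bool.not_false,
        List.map_cons, List.flatten_cons]
      rw [ih, pd_g_eq l]
      simp

lemma pd_flat_join (K : List (List Char)) :
    PySem.Chars.strip ((K.map (fun x => x ++ ['\n'])).flatten) = PySem.Chars.strip (PySem.Chars.join ['\n'] K) := by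
  have hstrip_nl : ∀ (x : List Char), PySem.Chars.strip (x ++ ['\n']) = PySem.Chars.strip x := by
    intro x
    have hsp : PySem.Chars.isspace '\n' = true := by decide
    have hr : ∀ (y : List Char), PySem.Chars.rstrip (y ++ ['\n']) = PySem.Chars.rstrip y := by
      intro y
      simp [PySem.Chars.rstrip, List.dropWhile, hsp]
    simp only [PySem.Chars.strip, PySem.Chars.lstrip]
    rw [List.dropWhile_append]
    split
    · next he =>
      simp only [List.isEmpty_iff] at he
      simp [List.dropWhile, hsp, he, PySem.Chars.rstrip]
    · exact hr _
  have hflat : ∀ (K : List (List Char)), K ≠ [] →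
      (K.map (fun x => x ++ ['\n'])).flatten = PySem.Chars.join ['\n'] K ++ ['\n'] := by
    intro K
    induction K with
    | nil => intro h; exact absurd rfl h
    | cons x xs ih =>
      intro _
      cases xs with
      | nil => simp [PySem.Chars.join_singleton]
      | cons y r =>
        rw [PySem.Chars.join_cons_cons]
        simp only [List.map_cons, List.flatten_cons] at ih ⊢
        rw [ih (by simp)]
        simp
  cases K with
  | nil => simp [PySem.Chars.join_nil]
  | cons x xs => rw [hflat (x :: xs) (by simp), hstrip_nl]

-- ===== VERDICT (by name: the statement is the Claim_ definition above) =====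
theorem process_docstring_spec : Claim_equal_process_docstring := by
  unfold Claim_equal_process_docstring
  intro data _
  unfold Spec_process_docstring process_docstring process_docstring_alt
  cases hl : List.lookup "doxygen" data with
  | none => rfl
  | some o =>
    cases o with
    | none => rfl
    | some s =>
      simp only []
      rw [pd_demark _ [], List.nil_append, pd_flat_join]
      rw [pd_toggle _ [] false, List.nil_append]
      rw [pd_split_eq]
      rcases hps : pdSplit (PySem.Chars.strip (PySem.Chars.join ['\n']
        (((PySem.Chars.splitOn (PySem.Chars.replace (PySem.Chars.replace s.toList "/**".toList []) "*/".toList []) ['\n']).filter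
            (fun l => !(decide (l = [] ∨ l = [' '])))).map
          (fun l => if PySem.Chars.startswith l "* ".toList then l.drop 2 else l)))) [] with _ | ⟨p0, rest⟩
      · exact absurd hps (pd_split_ne_nil _ _)
      · have halt := pd_alt (PySem.Chars.strip (PySem.Chars.join ['\n']
          (((PySem.Chars.splitOn (PySem.Chars.replace (PySem.Chars.replace s.toList "/**".toList []) "*/".toList []) ['\n']).filter
              (fun l => !(decide (l = [] ∨ l = [' '])))).map
            (fun l => if PySem.Chars.startswith l "* ".toList then l.drop 2 else l)))) [] false
        rw [hps] at halt
        simp only [pdAltB, List.reverse_nil, List.nil_append, Bool.not_false] at halt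
        rw [← halt]
        simp only [pd_join_flat, pd_enum rest 0]
        norm_num
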